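-- pv_equiv track=rewrite | github.com/gportella/codewars_challenges | circular_genome_assembly/genome_assembly_codewars.py | correct_read_against_contig
-- ===== SOURCE A (Python) =====
-- from typing import List, Tuple, Optional
--
-- def hamming_mismatches(s1: str, s2: str, max_allowed: int = float("inf")) -> int:
--     mismatches = 0
--     for c1, c2 in zip(s1, s2):
--         if c1 != c2:
--             mismatches += 1
--             if mismatches > max_allowed:
--                 return mismatches
--     return mismatches
--
-- def align_best_start_le1(read: str, contig: str) -> Optional[int]:
--     contig = contig.strip().upper()
--     read = read.strip().upper()
--     R = len(contig)
--     ref2 = contig + contig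
--     L = len(read)
--
--     best_s = None
--     best_mm = 2
--     for s in range(R):
--         w = ref2[s : s + L]
--         if len(w) < L:
--             break
--         mm = hamming_mismatches(read, w, max_allowed=1)
--         if mm <= 1 and mm < best_mm:
--             best_mm = mm
--             best_s = s
--             if mm == 0:
--                 break
--     return best_s
--
-- def correct_read_against_contig(read: str, contig: str) -> Optional[str]:
--     """Return read with its single mismatch corrected to the contig base; otherwise unchanged."""
--     r = read.strip().upper()
--     c = contig.strip().upper()
--     if not r or not c:
--         return None
--
--     s = align_best_start_le1(r, c)
--     if s is None:
--         return None
--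
--     ref2 = c + c
--     L = len(r)
--     window = ref2[s : s + L]
--
--     mism_idxs = [i for i, (rb, wb) in enumerate(zip(r, window)) if rb != wb]
--
--     if len(mism_idxs) == 0:
--         return read
--     if len(mism_idxs) > 2:
--         return None
--
--     # Correct the single mismatch
--     for i in mism_idxs:
--         corrected_base = window[i]
--         corrected = list(r)
--         corrected[i] = corrected_base
--     return "".join(corrected)
-- ===== SOURCE B (Python) =====
-- def correct_read_against_contig(read, contig):
--     """Return read with its single mismatch corrected to the contig base; otherwise unchanged."""
--     r = read.strip().upper()
--     c = contig.strip().upper()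
--     if not r or not c:
--         return None
--     L, R = len(r), len(c)
--     d = c + c
--     if r in d:
--         # some circular alignment is exact: the read needs no correction
--         return read
--     limit = min(R, 2 * R - L + 1)
--     for s in range(limit):
--         k = 0
--         while k < L and r[k] == d[s + k]:
--             k += 1
--         if r[k + 1:] == d[s + k + 1: s + L]:
--             return r[:k] + d[s + k] + r[k + 1:]
--     return None
-- ===== Notes on version B (the rewrite author's own statement) =====
-- stated objective: alternative
-- what changed: A scans every circular start counting mismatches with a capped counter and tracks the best start before re-deriving the mismatch positions; B first decides the zero-mismatch case with a single substring test of the read in the doubled contig, and otherwise finds the first start whose alignment is a common prefix, one differing base, and an equal tail, correcting in place via slicing.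
import Mathlib
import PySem

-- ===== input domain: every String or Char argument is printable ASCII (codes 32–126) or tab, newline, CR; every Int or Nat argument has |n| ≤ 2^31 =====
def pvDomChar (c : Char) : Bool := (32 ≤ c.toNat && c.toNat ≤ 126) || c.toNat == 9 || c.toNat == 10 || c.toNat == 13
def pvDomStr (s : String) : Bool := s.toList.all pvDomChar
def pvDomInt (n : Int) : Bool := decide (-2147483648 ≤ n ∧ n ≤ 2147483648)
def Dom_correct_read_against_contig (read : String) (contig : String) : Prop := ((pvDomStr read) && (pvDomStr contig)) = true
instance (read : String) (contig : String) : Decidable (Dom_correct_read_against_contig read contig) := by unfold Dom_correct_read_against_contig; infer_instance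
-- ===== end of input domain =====

-- ===== PORT A =====
-- B replaces A's per-start mismatch-counting scan with an exact-substring test on the doubled
-- contig followed by a common-prefix + tail-slice-equality scan (objective: alternative).

-- hamming_mismatches, specialized to max_allowed = 1 (its only call site)
def pvHamming : List (Char × Char) → Int → Int
  | [], mismatches => mismatches
  | (c1, c2) :: rest, mismatches =>
    if c1 ≠ c2 then
      if mismatches + 1 > 1 then mismatches + 1
      else pvHamming rest (mismatches + 1)
    else pvHamming rest mismatches

-- the `for s in range(R)` loop of align_best_start_le1 (break = early return)
def pvAlignGo (read ref2 : List Char) (L R : Nat) (s : Nat) (bestS : Option Nat) (bestMm : Int) : Option Nat :=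
  if hs : s < R then
    let w := PySem.List.slice ref2 (some (s : Int)) (some ((s + L : Nat) : Int))
    if w.length < L then bestS
    else
      let mm := pvHamming (read.zip w) 0
      if mm ≤ 1 ∧ mm < bestMm then
        if mm = 0 then some s
        else pvAlignGo read ref2 L R (s + 1) (some s) mm
      else pvAlignGo read ref2 L R (s + 1) bestS bestMm
  else bestS
termination_by R - s

-- align_best_start_le1 (it strips/uppercases its arguments again)
def pvAlign (read contig : List Char) : Option Nat :=
  let c := PySem.Chars.upper (PySem.Chars.strip contig)
  let r := PySem.Chars.upper (PySem.Chars.strip read)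
  pvAlignGo r (c ++ c) r.length c.length 0 none 2

def correct_read_against_contig (read contig : String) : Option String :=
  let r := PySem.Chars.upper (PySem.Chars.strip read.toList)
  let c := PySem.Chars.upper (PySem.Chars.strip contig.toList)
  if r = [] ∨ c = [] then none
  else
    match pvAlign r c with
    | none => none
    | some s =>
      let ref2 := c ++ c
      let L := r.length
      let window := PySem.List.slice ref2 (some (s : Int)) (some ((s + L : Nat) : Int))
      let mismIdxs := ((PySem.List.enumerate (r.zip window) 0).filter
        (fun p => p.2.1 ≠ p.2.2)).map Prod.fst
      if mismIdxs.length = 0 then some read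
      else if mismIdxs.length > 2 then none
      else
        -- the Python for-loop rebuilds `corrected = list(r)` from r on each iteration;
        -- enumerate indices are ≥ 0 and in range, so .toNat / getD are exact here
        let corrected := mismIdxs.foldl (fun _ i => r.set i.toNat (window.getD i.toNat ' ')) r
        some (String.ofList corrected)

-- ===== PORT B =====
-- `while k < L and r[k] == d[s + k]`; every index is in range at every use (s + L ≤ len d), so getD is exact
def pvLcpGo (r d : List Char) (s L : Nat) (k : Nat) : Nat :=
  if k < L ∧ r.getD k ' ' = d.getD (s + k) ' ' then pvLcpGo r d s L (k + 1) else k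
termination_by L - k

-- `for s in range(limit)` of Source B
def pvBGo (r d : List Char) (L : Nat) (limit : Nat) (s : Nat) : Option String :=
  if hs : s < limit then
    let k := pvLcpGo r d s L 0
    if PySem.List.slice r (some ((k + 1 : Nat) : Int)) none =
        PySem.List.slice d (some ((s + k + 1 : Nat) : Int)) (some ((s + L : Nat) : Int)) then
      some (String.ofList (PySem.List.slice r none (some ((k : Nat) : Int)) ++
        d.getD (s + k) ' ' :: PySem.List.slice r (some ((k + 1 : Nat) : Int)) none))
    else pvBGo r d L limit (s + 1)
  else none
termination_by limit - s

def correct_read_against_contig_alt (read contig : String) : Option String :=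
  let r := PySem.Chars.upper (PySem.Chars.strip read.toList)
  let c := PySem.Chars.upper (PySem.Chars.strip contig.toList)
  if r = [] ∨ c = [] then none
  else
    let L := r.length
    let R := c.length
    let d := c ++ c
    if PySem.Chars.isIn r d then some read
    else pvBGo r d L (min (R : Int) (2 * (R : Int) - (L : Int) + 1)).toNat 0

-- ===== PRECONDITION & SPEC =====
def Spec_correct_read_against_contig (read : String) (contig : String) (out : Option String) : Prop := out = correct_read_against_contig_alt read contig
instance (read : String) (contig : String) (out : Option String) : Decidable (Spec_correct_read_against_contig read contig out) := by unfold Spec_correct_read_against_contig; infer_instance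

-- ===== CLAIM (what is proved, stated in full; the proofs are below) =====
def Claim_equal_correct_read_against_contig : Prop := ∀ (read : String) (contig : String), Dom_correct_read_against_contig read contig → Spec_correct_read_against_contig read contig (correct_read_against_contig read contig)

-- ===== LEMMAS AND PROOFS =====

-- ---- proof-side notions: mismatch count, longest common prefix, circular window, first index satisfying a predicate ----

def pvCnt (r w : List Char) : Nat := (r.zip w).countP (fun p => p.1 ≠ p.2)

def pvLcpN : List Char → List Char → Nat
  | a :: as, b :: bs => if a = b then pvLcpN as bs + 1 else 0
  | _, _ => 0

def pvWin (d : List Char) (s L : Nat) : List Char := (d.drop s).take L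

def pvFirst (p : Nat → Bool) (limit s : Nat) : Option Nat :=
  if s < limit then (if p s then some s else pvFirst p limit (s + 1)) else none
termination_by limit - s

def pvMismIdxs : List (Char × Char) → List Nat
  | [] => []
  | (a, b) :: t => if a = b then (pvMismIdxs t).map (· + 1) else 0 :: (pvMismIdxs t).map (· + 1)

def pvExactB (r d : List Char) (L t : Nat) : Bool := pvCnt r (pvWin d t L) == 0
def pvHitB (r d : List Char) (L t : Nat) : Bool := decide (pvCnt r (pvWin d t L) ≤ 1)
def pvOneB (r d : List Char) (L t : Nat) : Bool := pvCnt r (pvWin d t L) == 1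

def pvFix (r d : List Char) (L t : Nat) : List Char :=
  r.set (pvLcpN r (pvWin d t L)) ((pvWin d t L).getD (pvLcpN r (pvWin d t L)) ' ')

-- ---- hamming_mismatches computes min(cnt, 2) ----

theorem pvHamming_one (l : List (Char × Char)) :
    pvHamming l 1 = if l.countP (fun p => p.1 ≠ p.2) = 0 then 1 else 2 := by
  induction l with
  | nil => simp [pvHamming]
  | cons p t ih =>
    obtain ⟨a, b⟩ := p
    by_cases hab : a = b <;> simp [pvHamming, hab, List.countP_cons, ih]

theorem pvHamming_zero (l : List (Char × Char)) :
    pvHamming l 0 = if l.countP (fun p => p.1 ≠ p.2) = 0 then 0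
      else if l.countP (fun p => p.1 ≠ p.2) = 1 then 1 else 2 := by
  induction l with
  | nil => simp [pvHamming]
  | cons p t ih =>
    obtain ⟨a, b⟩ := p
    by_cases hab : a = b
    · simp [pvHamming, hab, List.countP_cons, ih]
    · simp only [pvHamming, if_pos (by simpa using hab)]
      rw [if_neg (by norm_num), show (0 : Int) + 1 = 1 from by norm_num, pvHamming_one t]
      simp [List.countP_cons, hab]

-- ---- cnt / lcp facts ----

theorem pvCnt_eq_zero_iff (r w : List Char) (h : r.length = w.length) :
    pvCnt r w = 0 ↔ r = w := by
  induction r generalizing w with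
  | nil => cases w <;> simp_all [pvCnt]
  | cons a as ih =>
    cases w with
    | nil => simp at h
    | cons b bs =>
      simp only [pvCnt, List.zip_cons_cons, List.countP_cons] at *
      by_cases hab : a = b <;> subst_eqs <;> simp_all [pvCnt] <;> omega

theorem pvLcpN_lt (r w : List Char) (h : r.length = w.length) (hne : r ≠ w) :
    pvLcpN r w < r.length := by
  induction r generalizing w with
  | nil => cases w <;> simp_all
  | cons a as ih =>
    cases w with
    | nil => simp at h
    | cons b bs =>
      by_cases hab : a = b
      · subst hab
        have hne2 : as ≠ bs := by simp_all
        have := ih bs (by simpa using h) hne2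
        simp [pvLcpN]
        omega
      · simp [pvLcpN, hab]

theorem pvCnt_one_iff (r w : List Char) (h : r.length = w.length) (hne : r ≠ w) :
    pvCnt r w = 1 ↔ r.drop (pvLcpN r w + 1) = w.drop (pvLcpN r w + 1) := by
  induction r generalizing w with
  | nil => cases w <;> simp_all
  | cons a as ih =>
    cases w with
    | nil => simp at h
    | cons b bs =>
      by_cases hab : a = b
      · subst hab
        have hne2 : as ≠ bs := by simp_all
        have hlen : as.length = bs.length := by simpa using h
        have := ih bs hlen hne2
        simp only [pvCnt, pvLcpN, List.zip_cons_cons, List.countP_cons, if_pos rfl]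
        simpa [pvCnt] using this
      · simp only [pvCnt, pvLcpN, List.zip_cons_cons, List.countP_cons, if_neg hab]
        simp [hab, pvCnt]
        constructor
        · intro h0
          have : as = bs := by
            rw [← pvCnt_eq_zero_iff as bs (by simpa using h)]
            simpa [pvCnt] using h0
          simp [this]
        · intro h0
          have hlen : as.length = bs.length := by simpa using h
          have := (pvCnt_eq_zero_iff as bs hlen).2 h0
          simpa [pvCnt] using this

-- ---- the mismatch-index list of port A ----

theorem pvMismIdxs_length (l : List (Char × Char)) :
    (pvMismIdxs l).length = l.countP (fun p => p.1 ≠ p.2) := by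
  induction l with
  | nil => simp [pvMismIdxs]
  | cons p t ih =>
    obtain ⟨a, b⟩ := p
    by_cases hab : a = b <;> simp [pvMismIdxs, hab, List.countP_cons, ih]

theorem pvEnumerate_filter_map (l : List (Char × Char)) (i : Int) :
    ((PySem.List.enumerate l i).filter (fun p => p.2.1 ≠ p.2.2)).map Prod.fst
      = (pvMismIdxs l).map (fun k : Nat => i + (k : Int)) := by
  induction l generalizing i with
  | nil => simp [PySem.List.enumerate, pvMismIdxs]
  | cons p t ih =>
    obtain ⟨a, b⟩ := p
    by_cases hab : a = b
    · simp only [PySem.List.enumerate, pvMismIdxs, if_pos hab, List.filter_cons]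
      rw [if_neg (by simp [hab])]
      rw [ih (i + 1), List.map_map]
      congr 1
      funext k
      simp
      omega
    · simp only [PySem.List.enumerate, pvMismIdxs, if_neg hab, List.filter_cons]
      rw [if_pos (by simp [hab])]
      simp only [List.map_cons, ih (i + 1), List.map_map]
      congr 1
      · simp
      · congr 1
        funext k
        simp
        omega

theorem pvMismIdxs_zip_of_cnt_one (r w : List Char) (h1 : pvCnt r w = 1) :
    pvMismIdxs (r.zip w) = [pvLcpN r w] := by
  induction r generalizing w with
  | nil => simp [pvCnt] at h1
  | cons a as ih =>
    cases w with
    | nil => simp [pvCnt] at h1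
    | cons b bs =>
      by_cases hab : a = b
      · subst hab
        have h1' : pvCnt as bs = 1 := by simpa [pvCnt, List.countP_cons] using h1
        simp [pvMismIdxs, pvLcpN, ih bs h1']
      · have h0 : (as.zip bs).countP (fun p => p.1 ≠ p.2) = 0 := by
          have := h1
          simp [pvCnt, List.countP_cons, hab] at this ⊢
          omega
        simp [pvMismIdxs, pvLcpN, hab]
        rw [← List.length_eq_zero_iff, pvMismIdxs_length]
        exact h0

-- ---- window facts ----

theorem pvWin_length (d : List Char) (s L : Nat) : (pvWin d s L).length = min L (d.length - s) := by
  simp [pvWin]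

theorem pvWin_getElem (d : List Char) (s L k : Nat) (hk : k < L) (hd : s + L ≤ d.length) :
    (pvWin d s L).getD k ' ' = d.getD (s + k) ' ' := by
  have h1 : k < (pvWin d s L).length := by rw [pvWin_length]; omega
  have h2 : s + k < d.length := by omega
  rw [List.getD_eq_getElem _ _ h1, List.getD_eq_getElem _ _ h2]
  simp [pvWin]

-- ---- B's while-loop computes the lcp ----

theorem pvWin_drop (d : List Char) (s L k : Nat) :
    (pvWin d s L).drop k = List.take (L - k) (d.drop (s + k)) := by
  simp [pvWin, List.drop_take]

theorem pvLcpGo_eq_aux (r d : List Char) (s L : Nat) (hr : r.length = L) (hd : s + L ≤ d.length) :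
    ∀ k, k ≤ L → pvLcpGo r d s L k = k + pvLcpN (r.drop k) ((pvWin d s L).drop k) := by
  intro k hk
  induction hL : L - k generalizing k with
  | zero =>
    have hkL : k = L := by omega
    subst hkL
    rw [pvLcpGo]
    simp [hr, pvWin_length, List.drop_of_length_le, pvLcpN]
  | succ n ihn =>
    have hkL : k < L := by omega
    rw [pvLcpGo]
    have hrd : r.drop k = r[k] :: r.drop (k + 1) := List.drop_eq_getElem_cons (by omega)
    have hwk : k < (pvWin d s L).length := by rw [pvWin_length]; omega
    have hwd : (pvWin d s L).drop k = (pvWin d s L)[k] :: (pvWin d s L).drop (k + 1) :=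
      List.drop_eq_getElem_cons hwk
    have hrg : r.getD k ' ' = r[k] := List.getD_eq_getElem _ _ (by omega)
    have hdg : d.getD (s + k) ' ' = (pvWin d s L)[k] := by
      rw [← pvWin_getElem d s L k hkL hd, List.getD_eq_getElem _ _ hwk]
    by_cases heq : r[k] = (pvWin d s L)[k]
    · rw [if_pos ⟨hkL, by rw [hrg, hdg]; exact heq⟩, ihn (k + 1) (by omega) (by omega)]
      rw [hrd, hwd]
      simp [pvLcpN, heq]
      omega
    · rw [if_neg (by rw [hrg, hdg]; tauto)]
      rw [hrd, hwd]
      simp [pvLcpN, heq]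

theorem pvLcpGo_eq (r d : List Char) (s L : Nat) (hr : r.length = L) (hd : s + L ≤ d.length) :
    pvLcpGo r d s L 0 = pvLcpN r (pvWin d s L) := by
  simpa using pvLcpGo_eq_aux r d s L hr hd 0 (by omega)

-- ---- pvFirst facts ----

theorem pvFirst_eq_none_iff (p : Nat → Bool) (limit s : Nat) :
    pvFirst p limit s = none ↔ ∀ t, s ≤ t → t < limit → p t = false := by
  induction hL : limit - s generalizing s with
  | zero =>
    rw [pvFirst, if_neg (by omega)]
    constructor
    · intro _ t ht hlt; omega
    · intro _; rfl
  | succ n ihn =>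
    rw [pvFirst, if_pos (by omega)]
    by_cases hp : p s
    · rw [if_pos hp]
      constructor
      · intro h; simp at h
      · intro hall
        have := hall s le_rfl (by omega)
        simp [hp] at this
    · rw [if_neg (by simpa using hp)]
      rw [ihn (s + 1) (by omega)]
      constructor
      · intro h t ht hlt
        rcases Nat.eq_or_lt_of_le ht with rfl | h2
        · simpa using hp
        · exact h t h2 hlt
      · intro h t ht hlt
        exact h t (by omega) hlt

theorem pvFirst_spec (p : Nat → Bool) (limit s t : Nat) (h : pvFirst p limit s = some t) :
    s ≤ t ∧ t < limit ∧ p t = true ∧ ∀ u, s ≤ u → u < t → p u = false := by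
  induction hL : limit - s generalizing s with
  | zero =>
    rw [pvFirst, if_neg (by omega)] at h
    simp at h
  | succ n ihn =>
    rw [pvFirst, if_pos (by omega)] at h
    by_cases hp : p s
    · rw [if_pos hp] at h
      obtain rfl : s = t := by simpa using h
      exact ⟨le_rfl, by omega, hp, fun u hu hlt => by omega⟩
    · rw [if_neg (by simpa using hp)] at h
      obtain ⟨h1, h2, h3, h4⟩ := ihn (s + 1) h (by omega)
      refine ⟨by omega, h2, h3, fun u hu hlt => ?_⟩
      rcases Nat.eq_or_lt_of_le hu with rfl | h5
      · simpa using hp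
      · exact h4 u h5 hlt

theorem pvFirst_congr (p q : Nat → Bool) (limit s : Nat)
    (h : ∀ t, s ≤ t → t < limit → p t = q t) : pvFirst p limit s = pvFirst q limit s := by
  induction hL : limit - s generalizing s with
  | zero =>
    conv_lhs => rw [pvFirst]
    conv_rhs => rw [pvFirst]
    rw [if_neg (by omega), if_neg (by omega)]
  | succ n ihn =>
    have hs := h s le_rfl (by omega)
    have e1 : pvFirst p limit s = if p s then some s else pvFirst p limit (s + 1) := by
      rw [pvFirst, if_pos (show s < limit by omega)]
    have e2 : pvFirst q limit s = if q s then some s else pvFirst q limit (s + 1) := by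
      rw [pvFirst, if_pos (show s < limit by omega)]
    rw [e1, e2, hs]
    by_cases hq : q s
    · rw [if_pos hq, if_pos hq]
    · rw [if_neg (by simpa using hq), if_neg (by simpa using hq)]
      exact ihn (s + 1) (fun t ht hlt => h t (by omega) hlt) (by omega)

-- ---- A's alignment loop ----

theorem pvFirst_step (p : Nat → Bool) (limit s : Nat) (h : s < limit) :
    pvFirst p limit s = if p s then some s else pvFirst p limit (s + 1) := by
  rw [pvFirst, if_pos h]

theorem pvFirst_stop (p : Nat → Bool) (limit s : Nat) (h : limit ≤ s) :
    pvFirst p limit s = none := by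
  rw [pvFirst, if_neg (by omega)]

theorem pvSlice_win (d : List Char) (s L : Nat) :
    PySem.List.slice d (some (s : Int)) (some ((s + L : Nat) : Int)) = pvWin d s L := by
  rw [PySem.List.slice_natCast]
  unfold pvWin
  congr 1
  omega

theorem pvAlignGo_one (r c : List Char) (s b : Nat) (hr : r ≠ []) :
    pvAlignGo r (c ++ c) r.length c.length s (some b) 1
      = some ((pvFirst (pvExactB r (c ++ c) r.length) (min c.length (2 * c.length + 1 - r.length)) s).getD b) := by
  have hL : 1 ≤ r.length := List.length_pos_of_ne_nil hr
  have hd : (c ++ c).length = 2 * c.length := by rw [List.length_append]; omega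
  induction hn : c.length - s generalizing s with
  | zero =>
    rw [pvAlignGo, dif_neg (by omega), pvFirst_stop _ _ _ (by omega)]
    rfl
  | succ n ihn =>
    have hs : s < c.length := by omega
    rw [pvAlignGo, dif_pos hs]
    simp only [pvSlice_win, pvWin_length, hd]
    by_cases hshort : min r.length (2 * c.length - s) < r.length
    · rw [if_pos hshort, pvFirst_stop _ _ _ (by omega)]
      rfl
    · rw [if_neg hshort]
      have hlim : s < min c.length (2 * c.length + 1 - r.length) := by omega
      rw [pvHamming_zero, pvFirst_step _ _ _ hlim]
      by_cases h0 : (r.zip (pvWin (c ++ c) s r.length)).countP (fun p => p.1 ≠ p.2) = 0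
      · rw [if_pos h0]
        rw [if_pos (show (0 : Int) ≤ 1 ∧ (0 : Int) < 1 by norm_num)]
        rw [if_pos (show (0 : Int) = 0 from rfl)]
        have hex : pvExactB r (c ++ c) r.length s = true := by
          simp only [pvExactB, beq_iff_eq, pvCnt]; exact h0
        rw [hex, if_pos rfl]
        rfl
      · rw [if_neg h0]
        have hex : pvExactB r (c ++ c) r.length s = false := by
          simp only [pvExactB, pvCnt, beq_eq_false_iff_ne, ne_eq]; exact h0
        rw [hex]
        simp only [Bool.false_eq_true, if_false]
        by_cases h1 : (r.zip (pvWin (c ++ c) s r.length)).countP (fun p => p.1 ≠ p.2) = 1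
        · rw [if_pos h1, if_neg (show ¬ ((1 : Int) ≤ 1 ∧ (1 : Int) < 1) by norm_num)]
          exact ihn (s + 1) (by omega)
        · rw [if_neg h1, if_neg (show ¬ ((2 : Int) ≤ 1 ∧ (2 : Int) < 1) by norm_num)]
          exact ihn (s + 1) (by omega)

theorem pvAlignGo_none (r c : List Char) (s : Nat) (hr : r ≠ []) :
    pvAlignGo r (c ++ c) r.length c.length s none 2
      = match pvFirst (pvHitB r (c ++ c) r.length) (min c.length (2 * c.length + 1 - r.length)) s with
        | none => none
        | some t => if pvExactB r (c ++ c) r.length t then some t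
            else some ((pvFirst (pvExactB r (c ++ c) r.length) (min c.length (2 * c.length + 1 - r.length)) (t + 1)).getD t) := by
  have hL : 1 ≤ r.length := List.length_pos_of_ne_nil hr
  have hd : (c ++ c).length = 2 * c.length := by rw [List.length_append]; omega
  induction hn : c.length - s generalizing s with
  | zero =>
    rw [pvAlignGo, dif_neg (by omega), pvFirst_stop _ _ _ (by omega)]
  | succ n ihn =>
    have hs : s < c.length := by omega
    rw [pvAlignGo, dif_pos hs]
    simp only [pvSlice_win, pvWin_length, hd]
    by_cases hshort : min r.length (2 * c.length - s) < r.length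
    · rw [if_pos hshort, pvFirst_stop _ _ _ (by omega)]
    · rw [if_neg hshort]
      have hlim : s < min c.length (2 * c.length + 1 - r.length) := by omega
      rw [pvHamming_zero, pvFirst_step _ _ _ hlim]
      by_cases h0 : (r.zip (pvWin (c ++ c) s r.length)).countP (fun p => p.1 ≠ p.2) = 0
      · rw [if_pos h0]
        rw [if_pos (show (0 : Int) ≤ 1 ∧ (0 : Int) < 2 by norm_num)]
        rw [if_pos (show (0 : Int) = 0 from rfl)]
        have hhit : pvHitB r (c ++ c) r.length s = true := by
          simp only [pvHitB, pvCnt, decide_eq_true_eq]; omega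
        have hex : pvExactB r (c ++ c) r.length s = true := by
          simp only [pvExactB, beq_iff_eq, pvCnt]; exact h0
        rw [hhit]
        simp [hex]
      · rw [if_neg h0]
        have hex : pvExactB r (c ++ c) r.length s = false := by
          simp only [pvExactB, pvCnt, beq_eq_false_iff_ne, ne_eq]; exact h0
        by_cases h1 : (r.zip (pvWin (c ++ c) s r.length)).countP (fun p => p.1 ≠ p.2) = 1
        · rw [if_pos h1, if_pos (show (1 : Int) ≤ 1 ∧ (1 : Int) < 2 by norm_num),
            if_neg (show (1 : Int) ≠ 0 by norm_num)]
          have hhit : pvHitB r (c ++ c) r.length s = true := by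
            simp only [pvHitB, pvCnt, decide_eq_true_eq]; omega
          rw [hhit, pvAlignGo_one r c (s + 1) s hr]
          simp [hex]
        · rw [if_neg h1, if_neg (show ¬ ((2 : Int) ≤ 1 ∧ (2 : Int) < 2) by norm_num)]
          have hhit : pvHitB r (c ++ c) r.length s = false := by
            simp only [pvHitB, pvCnt, decide_eq_false_iff_not]; omega
          rw [hhit]
          simp only [Bool.false_eq_true, if_false]
          exact ihn (s + 1) (by omega)

-- ---- B's scan loop ----

theorem pvBGo_eq (r c : List Char) (s : Nat) (hr : r ≠ [])
    (hnoex : ∀ t, t < min c.length (2 * c.length + 1 - r.length) → pvExactB r (c ++ c) r.length t = false) :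
    pvBGo r (c ++ c) r.length (min c.length (2 * c.length + 1 - r.length)) s
      = (pvFirst (pvOneB r (c ++ c) r.length) (min c.length (2 * c.length + 1 - r.length)) s).map
          (fun t => String.ofList (pvFix r (c ++ c) r.length t)) := by
  have hL : 1 ≤ r.length := List.length_pos_of_ne_nil hr
  have hd : (c ++ c).length = 2 * c.length := by rw [List.length_append]; omega
  induction hn : min c.length (2 * c.length + 1 - r.length) - s generalizing s with
  | zero =>
    rw [pvBGo, dif_neg (by omega), pvFirst_stop _ _ _ (by omega)]
    rfl
  | succ n ihn =>
    have hs : s < min c.length (2 * c.length + 1 - r.length) := by omega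
    rw [pvBGo, dif_pos hs]
    have hfull : s + r.length ≤ (c ++ c).length := by rw [hd]; omega
    have hwl : (pvWin (c ++ c) s r.length).length = r.length := by
      rw [pvWin_length, hd]; omega
    have hne : r ≠ pvWin (c ++ c) s r.length := by
      intro he
      have hfalse := hnoex s hs
      simp only [pvExactB, pvCnt, beq_eq_false_iff_ne, ne_eq] at hfalse
      exact hfalse ((pvCnt_eq_zero_iff _ _ hwl.symm).2 he)
    have hk := pvLcpGo_eq r (c ++ c) s r.length rfl hfull
    have hklt : pvLcpN r (pvWin (c ++ c) s r.length) < r.length :=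
      pvLcpN_lt _ _ hwl.symm hne
    have hsl1 : PySem.List.slice r (some ((pvLcpN r (pvWin (c ++ c) s r.length) + 1 : Nat) : Int)) none
        = r.drop (pvLcpN r (pvWin (c ++ c) s r.length) + 1) := by
      rw [PySem.List.slice_from r (by positivity)]
      norm_num
    have hsl2 : PySem.List.slice (c ++ c)
          (some ((s + pvLcpN r (pvWin (c ++ c) s r.length) + 1 : Nat) : Int))
          (some ((s + r.length : Nat) : Int))
        = (pvWin (c ++ c) s r.length).drop (pvLcpN r (pvWin (c ++ c) s r.length) + 1) := by
      rw [PySem.List.slice_natCast, pvWin_drop]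
      congr 1
      omega
    have hsl3 : PySem.List.slice r none (some ((pvLcpN r (pvWin (c ++ c) s r.length) : Nat) : Int))
        = r.take (pvLcpN r (pvWin (c ++ c) s r.length)) := by
      rw [PySem.List.slice_to r (by positivity)]
      norm_num
    have hget : (c ++ c).getD (s + pvLcpN r (pvWin (c ++ c) s r.length)) ' '
        = (pvWin (c ++ c) s r.length).getD (pvLcpN r (pvWin (c ++ c) s r.length)) ' ' :=
      (pvWin_getElem (c ++ c) s r.length _ hklt hfull).symm
    simp only [hk]
    by_cases hcond : r.drop (pvLcpN r (pvWin (c ++ c) s r.length) + 1)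
        = (pvWin (c ++ c) s r.length).drop (pvLcpN r (pvWin (c ++ c) s r.length) + 1)
    · rw [hsl1, hsl2, if_pos hcond, hsl3, hget]
      have hone : pvOneB r (c ++ c) r.length s = true := by
        simp only [pvOneB, beq_iff_eq]
        exact (pvCnt_one_iff _ _ hwl.symm hne).2 hcond
      rw [pvFirst_step _ _ _ hs, hone, if_pos rfl]
      simp only [Option.map_some]
      congr 1
      unfold pvFix
      rw [List.set_eq_take_append_cons_drop, if_pos hklt]
    · rw [hsl1, hsl2, if_neg hcond]
      have hone : pvOneB r (c ++ c) r.length s = false := by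
        simp only [pvOneB, beq_eq_false_iff_ne, ne_eq]
        intro h1
        exact hcond ((pvCnt_one_iff _ _ hwl.symm hne).1 h1)
      rw [pvFirst_step _ _ _ hs, hone]
      simp only [Bool.false_eq_true, if_false]
      exact ihn (s + 1) (by omega)

-- ---- substring test on the doubled contig = some exact circular alignment ----

theorem pvIsIn_iff_exact (r c : List Char) (hr : r ≠ []) (hc : c ≠ []) :
    PySem.Chars.isIn r (c ++ c) = true
      ↔ ∃ t, t < min c.length (2 * c.length + 1 - r.length) ∧ pvExactB r (c ++ c) r.length t = true := by
  have hL : 1 ≤ r.length := List.length_pos_of_ne_nil hr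
  have hR : 1 ≤ c.length := List.length_pos_of_ne_nil hc
  have hd : (c ++ c).length = 2 * c.length := by rw [List.length_append]; omega
  constructor
  · intro h
    obtain ⟨j, hpre⟩ := (PySem.Chars.exists_prefix_drop_iff_isIn r (c ++ c)).2 h
    have hjlen : r.length ≤ (c ++ c).length - j := by
      have := hpre.length_le
      rw [List.length_drop] at this
      exact this
    have hj2 : j + r.length ≤ 2 * c.length := by omega
    by_cases hjR : j < c.length
    · refine ⟨j, by omega, ?_⟩
      simp only [pvExactB, beq_iff_eq]
      rw [pvCnt_eq_zero_iff r _ (by rw [pvWin_length, hd]; omega)]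
      unfold pvWin
      exact List.prefix_iff_eq_take.1 hpre
    · have hjR2 : c.length ≤ j := by omega
      have hdropc : List.drop j (c ++ c) = List.drop (j - c.length) c := by
        have hj3 : j = c.length + (j - c.length) := by omega
        rw [hj3, show c.length + (j - c.length) = c.length + (j - c.length) from rfl]
        rw [List.drop_append]
        simp [List.drop_of_length_le, show c.length ≤ c.length + (j - c.length) from by omega]
      have hpre2 : r <+: List.drop (j - c.length) c := by rwa [hdropc] at hpre
      have hpre3 : r <+: List.drop (j - c.length) (c ++ c) := by
        rw [List.drop_append_of_le_length (by omega)]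
        exact hpre2.trans (List.prefix_append _ _)
      refine ⟨j - c.length, by omega, ?_⟩
      simp only [pvExactB, beq_iff_eq]
      rw [pvCnt_eq_zero_iff r _ (by rw [pvWin_length, hd]; omega)]
      unfold pvWin
      exact List.prefix_iff_eq_take.1 hpre3
  · rintro ⟨t, hlt, hex⟩
    simp only [pvExactB, beq_iff_eq] at hex
    have hwl : (pvWin (c ++ c) t r.length).length = r.length := by
      rw [pvWin_length, hd]; omega
    have he : r = pvWin (c ++ c) t r.length := (pvCnt_eq_zero_iff r _ hwl.symm).1 hex
    apply (PySem.Chars.exists_prefix_drop_iff_isIn r (c ++ c)).1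
    exact ⟨t, List.prefix_iff_eq_take.2 (by nth_rewrite 1 [he]; rfl)⟩

-- ---- strip/upper idempotence (align_best_start_le1 re-strips already-stripped input) ----

theorem pvCharBounds (ch : Char) (h : PySem.Chars.islower ch = true) :
    97 ≤ ch.toNat ∧ ch.toNat ≤ 122 := by
  unfold PySem.Chars.islower at h
  simp only [Bool.and_eq_true, decide_eq_true_eq, Char.le_def, UInt32.le_iff_toNat_le] at h
  exact ⟨h.1, h.2⟩

theorem pvUpperToNat (ch : Char) (h : PySem.Chars.islower ch = true) :
    (Char.ofNat (ch.toNat - 32)).toNat = ch.toNat - 32 := by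
  obtain ⟨h1, h2⟩ := pvCharBounds ch h
  rw [Char.toNat_ofNat, if_pos]
  unfold Nat.isValidChar
  left
  omega

theorem pvUpperChar_upperChar (ch : Char) :
    PySem.Chars.upperChar (PySem.Chars.upperChar ch) = PySem.Chars.upperChar ch := by
  unfold PySem.Chars.upperChar
  by_cases h : PySem.Chars.islower ch = true
  · rw [if_pos h, if_neg]
    obtain ⟨h1, h2⟩ := pvCharBounds ch h
    have ht := pvUpperToNat ch h
    simp only [Char.toNat] at ht h1 h2
    unfold PySem.Chars.islower
    simp only [Bool.and_eq_true, decide_eq_true_eq, Char.le_def, UInt32.le_iff_toNat_le, not_and]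
    have h97 : ('a').val.toNat = 97 := by decide
    intro hcontra hcontra2
    simp only [Char.toNat] at hcontra hcontra2
    omega
  · simp [h]

theorem pvIsspace_upperChar (ch : Char) :
    PySem.Chars.isspace (PySem.Chars.upperChar ch) = PySem.Chars.isspace ch := by
  unfold PySem.Chars.upperChar
  by_cases h : PySem.Chars.islower ch = true
  · rw [if_pos h]
    obtain ⟨h1, h2⟩ := pvCharBounds ch h
    have ht := pvUpperToNat ch h
    unfold PySem.Chars.isspace
    rw [Bool.eq_iff_iff]
    simp only [Bool.or_eq_true, Bool.and_eq_true, decide_eq_true_eq, ht]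
    omega
  · rw [if_neg h]

theorem pvIsspace_comp_upperChar :
    (PySem.Chars.isspace ∘ PySem.Chars.upperChar) = PySem.Chars.isspace := by
  funext a
  simp [Function.comp, pvIsspace_upperChar]

theorem pvUpper_upper (x : List Char) :
    PySem.Chars.upper (PySem.Chars.upper x) = PySem.Chars.upper x := by
  unfold PySem.Chars.upper
  rw [List.map_map]
  apply List.map_congr_left
  intro a _
  exact pvUpperChar_upperChar a

theorem pvLstrip_upper (y : List Char) :
    PySem.Chars.lstrip (PySem.Chars.upper y) = PySem.Chars.upper (PySem.Chars.lstrip y) := by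
  unfold PySem.Chars.lstrip PySem.Chars.upper
  rw [List.dropWhile_map, pvIsspace_comp_upperChar]

theorem pvRstrip_upper (y : List Char) :
    PySem.Chars.rstrip (PySem.Chars.upper y) = PySem.Chars.upper (PySem.Chars.rstrip y) := by
  unfold PySem.Chars.rstrip PySem.Chars.upper
  rw [← List.map_reverse, List.dropWhile_map, pvIsspace_comp_upperChar, ← List.map_reverse]

theorem pvStrip_upper (y : List Char) :
    PySem.Chars.strip (PySem.Chars.upper y) = PySem.Chars.upper (PySem.Chars.strip y) := by
  unfold PySem.Chars.strip
  rw [pvLstrip_upper, pvRstrip_upper]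

theorem pvRstrip_idem (y : List Char) :
    PySem.Chars.rstrip (PySem.Chars.rstrip y) = PySem.Chars.rstrip y := by
  unfold PySem.Chars.rstrip
  rw [List.reverse_reverse, List.dropWhile_idempotent]

theorem pvDropWhile_prefix (p : Char → Bool) (w z : List Char)
    (hz : List.dropWhile p z = z) (hw : w <+: z) : List.dropWhile p w = w := by
  rcases w with _ | ⟨a, t⟩
  · simp
  · rw [List.dropWhile_eq_self_iff] at hz ⊢
    intro _
    have hlen : 0 < z.length := by
      have := hw.length_le
      simp at this ⊢
      omega
    have : z[0] = a := by
      obtain ⟨u, hu⟩ := hw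
      subst hu
      simp
    intro hp
    exact (hz hlen) (by rw [this]; simpa using hp)

theorem pvLstrip_rstrip_lstrip (x : List Char) :
    PySem.Chars.lstrip (PySem.Chars.rstrip (PySem.Chars.lstrip x)) = PySem.Chars.rstrip (PySem.Chars.lstrip x) := by
  have hz : List.dropWhile PySem.Chars.isspace (PySem.Chars.lstrip x) = PySem.Chars.lstrip x := by
    unfold PySem.Chars.lstrip
    exact List.dropWhile_idempotent _ _
  have hpre : PySem.Chars.rstrip (PySem.Chars.lstrip x) <+: PySem.Chars.lstrip x := by
    unfold PySem.Chars.rstrip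
    have := List.dropWhile_suffix (l := (PySem.Chars.lstrip x).reverse) PySem.Chars.isspace
    have h2 := this.reverse
    simpa using h2
  unfold PySem.Chars.lstrip
  exact pvDropWhile_prefix _ _ _ hz hpre

theorem pvStrip_strip (x : List Char) :
    PySem.Chars.strip (PySem.Chars.strip x) = PySem.Chars.strip x := by
  unfold PySem.Chars.strip
  rw [pvLstrip_rstrip_lstrip, pvRstrip_idem]

theorem pvStrip_upper_strip (x : List Char) :
    PySem.Chars.strip (PySem.Chars.upper (PySem.Chars.strip x)) = PySem.Chars.upper (PySem.Chars.strip x) := by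
  rw [pvStrip_upper, pvStrip_strip]

-- ===== VERDICT (by name: the statement is the Claim_ definition above) =====
set_option maxHeartbeats 1000000 in
theorem correct_read_against_contig_spec : Claim_equal_correct_read_against_contig := by
  intro read contig _
  unfold Spec_correct_read_against_contig
  simp only [correct_read_against_contig, correct_read_against_contig_alt]
  set r := PySem.Chars.upper (PySem.Chars.strip read.toList) with hrdef
  set c := PySem.Chars.upper (PySem.Chars.strip contig.toList) with hcdef
  have hcs : PySem.Chars.strip c = c := by rw [hcdef]; exact pvStrip_upper_strip _
  have hrs : PySem.Chars.strip r = r := by rw [hrdef]; exact pvStrip_upper_strip _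
  have hcu : PySem.Chars.upper c = c := by rw [hcdef]; exact pvUpper_upper _
  have hru : PySem.Chars.upper r = r := by rw [hrdef]; exact pvUpper_upper _
  clear hrdef hcdef
  clear_value r c
  by_cases hemp : r = [] ∨ c = []
  · rw [if_pos hemp, if_pos hemp]
  · rw [if_neg hemp, if_neg hemp]
    push_neg at hemp
    obtain ⟨hr, hc⟩ := hemp
    have halign : pvAlign r c = pvAlignGo r (c ++ c) r.length c.length 0 none 2 := by
      unfold pvAlign
      rw [hcs, hcu, hrs, hru]
    have hlimit : ((min (c.length : Int) (2 * (c.length : Int) - (r.length : Int) + 1)).toNat)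
        = min c.length (2 * c.length + 1 - r.length) := by omega
    rw [halign, hlimit]
    by_cases hE : ∃ t, t < min c.length (2 * c.length + 1 - r.length) ∧ pvExactB r (c ++ c) r.length t = true
    · -- some circular alignment is exact: both sides return the original read
      rw [(pvIsIn_iff_exact r c hr hc).2 hE]
      simp only [if_pos]
      obtain ⟨e, he1, he2⟩ := hE
      have hhite : pvHitB r (c ++ c) r.length e = true := by
        simp only [pvExactB, beq_iff_eq] at he2
        simp only [pvHitB, decide_eq_true_eq, he2]
        omega
      cases hfh : pvFirst (pvHitB r (c ++ c) r.length) (min c.length (2 * c.length + 1 - r.length)) 0 with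
      | none =>
        exact absurd hhite (by simp [(pvFirst_eq_none_iff _ _ _).1 hfh e (Nat.zero_le e) he1])
      | some t =>
        obtain ⟨-, ht2, ht3, ht4⟩ := pvFirst_spec _ _ _ _ hfh
        by_cases hext : pvExactB r (c ++ c) r.length t = true
        · have halignres : pvAlignGo r (c ++ c) r.length c.length 0 none 2 = some t := by
            rw [pvAlignGo_none r c 0 hr, hfh]
            simp [hext]
          have hcnt0 : pvCnt r (pvWin (c ++ c) t r.length) = 0 := by
            simpa [pvExactB] using hext
          have hmism : pvMismIdxs (r.zip (pvWin (c ++ c) t r.length)) = [] := by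
            rw [← List.length_eq_zero_iff, pvMismIdxs_length]
            exact hcnt0
          rw [halignres]
          split
          · rename_i heq
            exact absurd heq (by simp)
          · rename_i s heq
            injection heq with heqs
            subst heqs
            simp only [pvSlice_win, pvEnumerate_filter_map, hmism, List.map_nil, List.length_nil]
            rw [if_pos trivial]
        · rw [Bool.not_eq_true] at hext
          have hege : t + 1 ≤ e := by
            rcases Nat.lt_or_ge t e with h | h
            · omega
            · exfalso
              rcases Nat.eq_or_lt_of_le h with h2 | h2
              · subst h2
                rw [hext] at he2
                exact Bool.false_ne_true he2
              · have := ht4 e (Nat.zero_le e) h2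
                rw [this] at hhite
                exact Bool.false_ne_true hhite
          cases hfe : pvFirst (pvExactB r (c ++ c) r.length) (min c.length (2 * c.length + 1 - r.length)) (t + 1) with
          | none =>
            have := (pvFirst_eq_none_iff _ _ _).1 hfe e hege he1
            rw [this] at he2
            exact absurd he2 Bool.false_ne_true
          | some e' =>
            obtain ⟨-, he'2, he'3, -⟩ := pvFirst_spec _ _ _ _ hfe
            have halignres : pvAlignGo r (c ++ c) r.length c.length 0 none 2 = some e' := by
              rw [pvAlignGo_none r c 0 hr, hfh]
              simp [hext, hfe]
            have hcnt0 : pvCnt r (pvWin (c ++ c) e' r.length) = 0 := by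
              simpa [pvExactB] using he'3
            have hmism : pvMismIdxs (r.zip (pvWin (c ++ c) e' r.length)) = [] := by
              rw [← List.length_eq_zero_iff, pvMismIdxs_length]
              exact hcnt0
            rw [halignres]
            split
            · rename_i heq
              exact absurd heq (by simp)
            · rename_i s heq
              injection heq with heqs
              subst heqs
              simp only [pvSlice_win, pvEnumerate_filter_map, hmism, List.map_nil, List.length_nil]
              rw [if_pos trivial]
    · -- no exact alignment: both sides search for the first start with exactly one mismatch
      have hnoex : ∀ t, t < min c.length (2 * c.length + 1 - r.length) → pvExactB r (c ++ c) r.length t = false := by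
        intro t ht
        cases h : pvExactB r (c ++ c) r.length t with
        | false => rfl
        | true => exact absurd ⟨t, ht, h⟩ hE
      have hIn : PySem.Chars.isIn r (c ++ c) = false := by
        cases h : PySem.Chars.isIn r (c ++ c) with
        | false => rfl
        | true => exact absurd ((pvIsIn_iff_exact r c hr hc).1 h) hE
      rw [hIn]
      simp only [Bool.false_eq_true, if_false]
      rw [pvBGo_eq r c 0 hr hnoex]
      have hcong : ∀ t, 0 ≤ t → t < min c.length (2 * c.length + 1 - r.length) →
          pvHitB r (c ++ c) r.length t = pvOneB r (c ++ c) r.length t := by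
        intro t _ ht
        have h := hnoex t ht
        simp only [pvExactB, beq_eq_false_iff_ne, ne_eq] at h
        unfold pvHitB pvOneB
        rw [Bool.eq_iff_iff]
        rw [decide_eq_true_eq, beq_iff_eq]
        omega
      cases hfo : pvFirst (pvOneB r (c ++ c) r.length) (min c.length (2 * c.length + 1 - r.length)) 0 with
      | none =>
        have halignres : pvAlignGo r (c ++ c) r.length c.length 0 none 2 = none := by
          rw [pvAlignGo_none r c 0 hr, pvFirst_congr _ _ _ _ hcong, hfo]
        rw [halignres]
        rfl
      | some t =>
        obtain ⟨-, ht2, ht3, -⟩ := pvFirst_spec _ _ _ _ hfo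
        have hext : pvExactB r (c ++ c) r.length t = false := hnoex t ht2
        have hfe : pvFirst (pvExactB r (c ++ c) r.length) (min c.length (2 * c.length + 1 - r.length)) (t + 1) = none := by
          rw [pvFirst_eq_none_iff]
          intro u _ hu
          exact hnoex u hu
        have halignres : pvAlignGo r (c ++ c) r.length c.length 0 none 2 = some t := by
          rw [pvAlignGo_none r c 0 hr, pvFirst_congr _ _ _ _ hcong, hfo]
          simp [hext, hfe]
        have hcnt1 : pvCnt r (pvWin (c ++ c) t r.length) = 1 := by
          simpa [pvOneB] using ht3
        have hmism : pvMismIdxs (r.zip (pvWin (c ++ c) t r.length)) = [pvLcpN r (pvWin (c ++ c) t r.length)] :=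
          pvMismIdxs_zip_of_cnt_one _ _ hcnt1
        rw [halignres]
        simp only [Option.map_some]
        simp only [pvSlice_win, pvEnumerate_filter_map, hmism, List.map_cons, List.map_nil]
        rw [if_neg (by simp), if_neg (by simp)]
        simp only [List.foldl_cons, List.foldl_nil]
        have htn : ((0 : Int) + (pvLcpN r (pvWin (c ++ c) t r.length) : Int)).toNat
            = pvLcpN r (pvWin (c ++ c) t r.length) := by omega
        rw [htn]
        unfold pvFix
        rfl
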